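-- pv_equiv track=rewrite | github.com/williamques/HopfieldNetworkCompression | PGM Expander.py | expand_pixels
-- ===== SOURCE A (Python) =====
-- def expand_pixels(imageData):
--     newImageData = []
--     for i in range(len(imageData)):
--         newRow = []
--         for j in range(len(imageData[i])):
--             pixel = imageData[i][j]
--             newRow.extend([pixel, pixel])
--         newImageData.extend([newRow.copy(), newRow.copy()])
--     return newImageData
-- ===== SOURCE B (Python) =====
-- def expand_pixels(imageData):
--     # Closed-form coordinate construction: output pixel (i, j) is
--     # imageData[i // 2][j // 2]; nothing is duplicated or copied.
--     return [
--         [imageData[i // 2][j // 2] for j in range(2 * len(imageData[i // 2]))]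
--         for i in range(2 * len(imageData))
--     ]
-- ===== Notes on version B (the rewrite author's own statement) =====
-- stated objective: alternative
-- what changed: B builds the output by a closed-form coordinate map (pixel (i,j) := imageData[i//2][j//2] over ranges of output indices) instead of A's accumulator loops that extend lists with duplicated pixels and copied rows.
import Mathlib
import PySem

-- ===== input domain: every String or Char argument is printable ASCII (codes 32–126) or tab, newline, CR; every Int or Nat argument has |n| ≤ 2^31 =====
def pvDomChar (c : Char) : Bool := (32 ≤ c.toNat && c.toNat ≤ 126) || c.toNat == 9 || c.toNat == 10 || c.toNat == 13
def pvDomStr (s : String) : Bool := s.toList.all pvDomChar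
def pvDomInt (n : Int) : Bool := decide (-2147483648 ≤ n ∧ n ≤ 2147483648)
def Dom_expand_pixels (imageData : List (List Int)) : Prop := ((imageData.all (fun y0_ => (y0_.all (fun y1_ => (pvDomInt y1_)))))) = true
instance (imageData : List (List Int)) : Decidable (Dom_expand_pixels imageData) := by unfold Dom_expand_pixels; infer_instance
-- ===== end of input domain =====

-- B builds the output by a closed-form coordinate map (output pixel (i,j) :=
-- imageData[i//2][j//2] over output-index ranges) instead of A's accumulator
-- loops that extend lists with duplicated pixels and copied rows (objective: alternative).

-- ===== PORT A =====
-- A: accumulate newRow by extending [pixel, pixel] per pixel, then extend the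
-- output with two copies of the finished row, per row.
def expand_pixels (imageData : List (List Int)) : List (List Int) :=
  imageData.foldl
    (fun newImageData row =>
      let newRow := row.foldl (fun r pixel => r ++ [pixel, pixel]) []
      newImageData ++ [newRow, newRow])
    []

-- ===== PORT B =====
-- B: map over output coordinates; indices i/2, j/2 are always in range, so
-- Python's imageData[i//2][j//2] is ported as getD (never hit: default).
def expand_pixels_alt (imageData : List (List Int)) : List (List Int) :=
  (List.range (2 * imageData.length)).map (fun i =>
    let src := imageData.getD (i / 2) []
    (List.range (2 * src.length)).map (fun j => src.getD (j / 2) 0))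

-- ===== PRECONDITION & SPEC =====
def Spec_expand_pixels (imageData : List (List Int)) (out : List (List Int)) : Prop := out = expand_pixels_alt imageData
instance (imageData : List (List Int)) (out : List (List Int)) : Decidable (Spec_expand_pixels imageData out) := by unfold Spec_expand_pixels; infer_instance

-- ===== CLAIM (what is proved, stated in full; the proofs are below) =====
def Claim_equal_expand_pixels : Prop := ∀ (imageData : List (List Int)), Dom_expand_pixels imageData → Spec_expand_pixels imageData (expand_pixels imageData)

-- ===== LEMMAS AND PROOFS =====
-- Halved-index map over a doubled range equals pairwise duplication.
theorem pv_range_half {α β : Type} (f : α → β) (d : α) (l : List α) :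
    (List.range (2 * l.length)).map (fun i => f (l.getD (i / 2) d))
      = l.flatMap (fun r => [f r, f r]) := by
  induction l with
  | nil => simp
  | cons a t ih =>
    have h2 : 2 * (a :: t).length = 2 + 2 * t.length := by simp [List.length]; ring
    rw [h2, List.range_add, List.map_append]
    have hshift : ((List.range (2 * t.length)).map (fun x => 2 + x)).map
          (fun i => f ((a :: t).getD (i / 2) d))
        = (List.range (2 * t.length)).map (fun i => f (t.getD (i / 2) d)) := by
      rw [List.map_map]
      refine List.map_congr_left ?_
      intro i _
      have : (2 + i) / 2 = i / 2 + 1 := by omega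
      simp [Function.comp, this]
    rw [hshift, ih]
    simp [List.range_succ_eq_map]

theorem pv_outer_fold (l : List (List Int)) (acc : List (List Int)) :
    l.foldl (fun out row =>
        let newRow := row.foldl (fun r pixel => r ++ [pixel, pixel]) []
        out ++ [newRow, newRow]) acc
      = acc ++ (l.map (fun row => row.flatMap (fun p => [p, p]))).flatMap (fun row => [row, row]) := by
  induction l generalizing acc with
  | nil => simp
  | cons r t ih => simp [List.foldl, List.flatMap, Function.comp_def]

theorem pv_alt_flatMap (imageData : List (List Int)) :
    expand_pixels_alt imageData
      = (imageData.map (fun row => row.flatMap (fun p => [p, p]))).flatMap (fun row => [row, row]) := by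
  unfold expand_pixels_alt
  have hrow : ∀ row : List Int,
      (List.range (2 * row.length)).map (fun j => row.getD (j / 2) 0)
        = row.flatMap (fun p => [p, p]) :=
    fun row => pv_range_half (fun p : Int => p) 0 row
  simp only [hrow, List.flatMap_map]
  exact pv_range_half (fun src : List Int => src.flatMap (fun p => [p, p])) [] imageData

-- ===== VERDICT (by name: the statement is the Claim_ definition above) =====
theorem expand_pixels_spec : Claim_equal_expand_pixels := by
  intro imageData _
  unfold Spec_expand_pixels expand_pixels
  rw [pv_alt_flatMap]
  simpa using pv_outer_fold imageData []
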